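-- pv_equiv track=rewrite | github.com/mauuroo/INF129-Y | SolucionesC1/c1_2025-1.py | filas_secas
-- ===== SOURCE A (Python) =====
-- def misterio(s):
--     i = 2
--     m = int(s[0])
--     while i<len(s):
--         if int(s[i]) > m:
--             m = int(s[i])
--         i += 2
--     return m
--
-- def filas_secas(invernadero, umbral):
--     fila = "" #Subcadena que ira sumando cáracteres hasta el final de la fila
--     filas_secas = 0
--     i_aux = 1 #Indice auxiliar que nos servirá para comparar si estamos en la última fila (no contiene un "|" al final)
--
--     for caracter in invernadero:
--         if caracter == "|": #La subcadena s ya contiene una fila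
--             if misterio(fila) < umbral:
--                 filas_secas += 1
--             fila = "" #Como ya analizamos una fila, hay que resetear a "" el valor de la subcadena
--         else:
--             fila += caracter #Sumamos cáracteres
--
--         if i_aux == len(invernadero): #Estamos en la última fila ya que el indice auxiliar es igual al largo de la cadena completa
--             if misterio(fila) < umbral:
--                 filas_secas += 1
--
--         i_aux += 1
--
--     return filas_secas
-- ===== SOURCE B (Python) =====
-- def misterio(s):
--     i = 2
--     m = int(s[0])
--     while i<len(s):
--         if int(s[i]) > m:
--             m = int(s[i])
--         i += 2
--     return m
--
-- def filas_secas(invernadero, umbral):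
--     if invernadero == "":
--         return 0
--     return sum(1 for fila in invernadero.split("|") if misterio(fila) < umbral)
-- ===== Notes on version B (the rewrite author's own statement) =====
-- stated objective: simpler
-- what changed: B keeps the helper misterio unchanged but replaces A's character-by-character accumulator with its i_aux last-row bookkeeping by tokenizing the greenhouse with split('|') and counting the rows whose misterio value is below the threshold (with an explicit 0 for the empty greenhouse, which has no rows).
import Mathlib
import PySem

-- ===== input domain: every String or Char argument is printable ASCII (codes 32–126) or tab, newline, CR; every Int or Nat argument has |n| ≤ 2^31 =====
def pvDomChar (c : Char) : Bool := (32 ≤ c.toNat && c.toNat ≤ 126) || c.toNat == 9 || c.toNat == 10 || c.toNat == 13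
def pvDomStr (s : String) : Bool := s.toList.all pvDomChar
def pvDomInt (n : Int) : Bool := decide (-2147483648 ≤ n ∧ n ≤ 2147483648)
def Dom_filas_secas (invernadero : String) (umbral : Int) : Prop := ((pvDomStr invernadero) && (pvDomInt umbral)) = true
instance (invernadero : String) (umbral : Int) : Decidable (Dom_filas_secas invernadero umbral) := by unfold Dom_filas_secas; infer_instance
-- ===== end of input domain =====

-- B replaces A's character-by-character accumulator and index bookkeeping with a split on "|"
-- and a count over the rows: a simpler row-level decomposition of the same computation.


-- ===== PORT A =====
-- helper `misterio` (shared verbatim by A and B): m = int(s[0]); scan even indices 2,4,…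
-- none = the IndexError/ValueError Python raises (empty row / non-digit at an even index).
def misterioLoop (s : List Char) (m : Int) (i : Nat) : Option Int :=
  if h : i < s.length then
    match PySem.Int.ofChars? [s[i]] with
    | none => none
    | some v => misterioLoop s (if v > m then v else m) (i + 2)
  else some m
termination_by s.length - i
decreasing_by omega

def misterio (s : List Char) : Option Int :=
  match PySem.List.pyGet? s 0 with
  | none => none
  | some c =>
    match PySem.Int.ofChars? [c] with
    | none => none
    | some m => misterioLoop s m 2

-- one iteration of A's for-loop body (the `if caracter == "|"` part): new (fila, filas_secas)
def fsStep (umbral : Int) (fila : List Char) (cnt : Int) (c : Char) : Option (List Char × Int) :=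
  if c = '|' then
    match misterio fila with
    | none => none
    | some m => some ([], cnt + (if m < umbral then 1 else 0))
  else some (fila ++ [c], cnt)

-- A's `if i_aux == len(invernadero)` branch (runs exactly at the last character)
def fsLast (umbral : Int) (fila : List Char) (cnt : Int) : Option Int :=
  match misterio fila with
  | none => none
  | some m => some (cnt + (if m < umbral then 1 else 0))

def fsLoop (umbral : Int) : List Char → List Char → Int → Option Int
  | [], _fila, cnt => some cnt
  | c :: cs, fila, cnt =>
    match fsStep umbral fila cnt c with
    | none => none
    | some (fila', cnt') =>
      match cs with
      | [] => fsLast umbral fila' cnt'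
      | _ :: _ => fsLoop umbral cs fila' cnt'

def filas_secas (invernadero : String) (umbral : Int) : Int :=
  (fsLoop umbral invernadero.toList [] 0).getD 0

-- ===== PORT B =====
-- one summand of B's `sum(1 for fila in … if misterio(fila) < umbral)`
def fsAltRow (umbral : Int) (acc : Option Int) (fila : List Char) : Option Int :=
  match acc with
  | none => none
  | some cnt =>
    match misterio fila with
    | none => none
    | some m => some (cnt + (if m < umbral then 1 else 0))

def filas_secas_alt (invernadero : String) (umbral : Int) : Int :=
  if invernadero = "" then 0
  else ((invernadero.toList.splitOn '|').foldl (fsAltRow umbral) (some 0)).getD 0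

-- ===== PRECONDITION & SPEC =====
-- Pre_ is exactly the set where Python's filas_secas returns: every '|'-separated row is
-- nonempty and carries an ASCII digit at each even index (otherwise misterio raises
-- IndexError/ValueError); the empty greenhouse, whose loop never runs, is admitted too.
def Pre_filas_secas (invernadero : String) (umbral : Int) : Prop :=
  invernadero = "" ∨
    ∀ row ∈ invernadero.toList.splitOn '|', row ≠ [] ∧
      ∀ i < row.length, i % 2 = 0 → ('0' ≤ row.getD i ' ' ∧ row.getD i ' ' ≤ '9')
instance (invernadero : String) (umbral : Int) : Decidable (Pre_filas_secas invernadero umbral) := by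
  unfold Pre_filas_secas; infer_instance

def pvWitness_filas_secas : String × Int := ("34|25", 4)

def Spec_filas_secas (invernadero : String) (umbral : Int) (out : Int) : Prop := out = filas_secas_alt invernadero umbral
instance (invernadero : String) (umbral : Int) (out : Int) : Decidable (Spec_filas_secas invernadero umbral out) := by unfold Spec_filas_secas; infer_instance

-- ===== CLAIM (what is proved, stated in full; the proofs are below) =====
def Claim_equal_filas_secas : Prop := ∀ (invernadero : String) (umbral : Int), Dom_filas_secas invernadero umbral → Pre_filas_secas invernadero umbral → Spec_filas_secas invernadero umbral (filas_secas invernadero umbral)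

-- ===== LEMMAS AND PROOFS =====
theorem foldl_fsAltRow_none (umbral : Int) (rs : List (List Char)) :
    rs.foldl (fsAltRow umbral) none = none := by
  induction rs with
  | nil => rfl
  | cons r rs ih => simpa [fsAltRow] using ih

theorem misterio_nil : misterio ([] : List Char) = none := rfl

theorem fsLoop_cons_cons (umbral : Int) (c d : Char) (ds fila : List Char) (cnt : Int) :
    fsLoop umbral (c :: d :: ds) fila cnt
      = match fsStep umbral fila cnt c with
        | none => none
        | some (fila', cnt') => fsLoop umbral (d :: ds) fila' cnt' := rfl

theorem no_sep_of_not_mem (fila : List Char) (h : '|' ∉ fila) :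
    ∀ x ∈ fila, ¬(x == '|') = true := by
  intro x hx hb
  exact h (beq_iff_eq.mp hb ▸ hx)

theorem fsLoop_eq_foldl (umbral : Int) (cs : List Char) :
    ∀ (fila : List Char) (cnt : Int), cs ≠ [] → '|' ∉ fila →
      fsLoop umbral cs fila cnt
        = ((fila ++ cs).splitOn '|').foldl (fsAltRow umbral) (some cnt) := by
  induction cs with
  | nil => intro _ _ h _; exact absurd rfl h
  | cons c cs ih =>
    intro fila cnt _ hfila
    by_cases hc : c = '|'
    · subst hc
      have hsplit : (fila ++ '|' :: cs).splitOn '|' = fila :: cs.splitOn '|' := by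
        simpa [List.splitOn] using
          List.splitOnP_first (fun x => x == '|') fila (no_sep_of_not_mem fila hfila)
            '|' (by simp) cs
      cases hm : misterio fila with
      | none =>
        cases cs with
        | nil => simp [fsLoop, fsStep, hsplit, fsAltRow, hm]
        | cons d ds =>
          rw [fsLoop_cons_cons]
          simp [fsStep, hm, hsplit, fsAltRow, foldl_fsAltRow_none]
      | some m =>
        cases cs with
        | nil =>
          simp [fsLoop, fsStep, fsLast, hsplit, fsAltRow, hm, misterio_nil]
        | cons d ds =>
          have hih := ih ([]) (cnt + (if m < umbral then 1 else 0)) (by simp) (by simp)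
          simp only [List.nil_append] at hih
          rw [fsLoop_cons_cons]
          simp [fsStep, hm, hsplit, fsAltRow, hih]
    · have hfila' : '|' ∉ fila ++ [c] := by
        intro h; rcases List.mem_append.mp h with h | h
        · exact hfila h
        · simp at h; exact hc h.symm
      cases cs with
      | nil =>
        have hsplit : (fila ++ [c]).splitOn '|' = [fila ++ [c]] := by
          simpa [List.splitOn] using
            List.splitOnP_eq_single (fun x => x == '|') (fila ++ [c])
              (no_sep_of_not_mem (fila ++ [c]) hfila')
        simp [fsLoop, fsStep, hc, fsLast, hsplit, fsAltRow]
      | cons d ds =>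
        have hih := ih (fila ++ [c]) cnt (by simp) hfila'
        rw [fsLoop_cons_cons]
        simpa [fsStep, hc] using hih

-- ===== VERDICT (by name: the statement is the Claim_ definition above) =====
theorem filas_secas_spec : Claim_equal_filas_secas := by
  intro invernadero umbral _dom _pre
  unfold Spec_filas_secas filas_secas filas_secas_alt
  by_cases hs : invernadero = ""
  · subst hs; rfl
  · have hl : invernadero.toList ≠ [] := by
      intro h
      exact hs (String.toList_inj.mp (by simpa using h))
    rw [if_neg hs, fsLoop_eq_foldl umbral invernadero.toList [] 0 hl (by simp)]
    simp
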